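-- pv_equiv track=rewrite | github.com/Waseem0718/Python_programs | Strings/next_charater.py | next_char
-- ===== SOURCE A (Python) =====
-- def next_char(s):
--     output = ""
--     for i in range(len(s)):
--         if i%2 == 0:
--             output += s[i]
--         else:
--             output += chr(ord(s[i-1])+int(s[i]))
--
--     return output
-- ===== SOURCE B (Python) =====
-- def next_char(s):
--     pieces = []
--     for k in range(0, len(s) - 1, 2):
--         c = s[k]
--         pieces.append(c)
--         pieces.append(chr(ord(c) + int(s[k + 1])))
--     if len(s) % 2 == 1:
--         pieces.append(s[-1])
--     return "".join(pieces)
-- ===== Notes on version B (the rewrite author's own statement) =====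
-- stated objective: alternative
-- what changed: B iterates over consecutive character pairs (step-2 loop emitting two pieces per pair, plus an unchanged trailing char for odd length) and joins a piece list at the end, instead of A's per-index loop with a parity test and repeated string concatenation.
import Mathlib
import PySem

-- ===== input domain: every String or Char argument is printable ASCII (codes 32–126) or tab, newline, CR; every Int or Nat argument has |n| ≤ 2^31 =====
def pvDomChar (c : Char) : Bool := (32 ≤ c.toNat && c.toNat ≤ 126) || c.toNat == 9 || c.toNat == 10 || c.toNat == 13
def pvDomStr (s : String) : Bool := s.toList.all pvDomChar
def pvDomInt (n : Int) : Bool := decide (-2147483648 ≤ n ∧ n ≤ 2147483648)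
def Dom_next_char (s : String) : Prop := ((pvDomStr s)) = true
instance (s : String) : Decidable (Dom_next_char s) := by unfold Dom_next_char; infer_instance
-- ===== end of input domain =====

-- B regroups the pass into consecutive character pairs with a joined piece list; alternative decomposition, same cost.

-- chr(ord(c) + int(d)) — shared subexpression of both Pythons; chr/ord ported by hand:
-- exact here since inside Pre_ the argument of chr is in [ord c, ord c + 9] ⊆ [0, 0x110000).
def pvShift (c d : Char) : Char :=
  Char.ofNat ((c.toNat : Int) + (PySem.Int.ofStr? (String.singleton d)).getD 0).toNat

-- ===== PORT A =====
def next_char (s : String) : String :=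
  String.mk ((PySem.List.pyRange 0 (PySem.Str.len s) 1).foldl
    (fun output i =>
      if PySem.Int.mod i 2 = 0 then
        output ++ [(PySem.Str.pyGet? s i).getD ' ']
      else
        output ++ [pvShift ((PySem.Str.pyGet? s (i - 1)).getD ' ') ((PySem.Str.pyGet? s i).getD ' ')])
    ([] : List Char))

-- ===== PORT B =====
-- the step-2 pair loop of Source B as the obvious two-at-a-time structural recursion;
-- the [c] case is Source B's trailing-character append for odd length.
def pvPairsB : List Char → List Char
  | [] => []
  | [c] => [c]
  | c :: d :: rest => c :: pvShift c d :: pvPairsB rest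

def next_char_alt (s : String) : String := String.mk (pvPairsB s.toList)

-- ===== PRECONDITION & SPEC =====
-- Pre_ excludes exactly the inputs where Python A raises ValueError: int(s[i]) with a
-- non-digit character at an odd index.
def Pre_next_char (s : String) : Prop :=
  ∀ k < s.toList.length, k % 2 = 1 → (s.toList[k]?.getD ' ').isDigit = true
instance (s : String) : Decidable (Pre_next_char s) := by unfold Pre_next_char; infer_instance
def pvWitness_next_char : String := "a3b4"

def Spec_next_char (s : String) (out : String) : Prop := out = next_char_alt s
instance (s : String) (out : String) : Decidable (Spec_next_char s out) := by unfold Spec_next_char; infer_instance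

-- ===== CLAIM (what is proved, stated in full; the proofs are below) =====
def Claim_equal_next_char : Prop := ∀ (s : String), Dom_next_char s → Pre_next_char s → Spec_next_char s (next_char s)

-- ===== LEMMAS AND PROOFS =====

lemma pvFoldIte {α β : Type} (p : α → Prop) [DecidablePred p] (f g : α → β)
    (l : List α) (acc : List β) :
    l.foldl (fun out i => if p i then out ++ [f i] else out ++ [g i]) acc
      = acc ++ l.map (fun i => if p i then f i else g i) := by
  induction l generalizing acc with
  | nil => simp
  | cons x xs ih => by_cases h : p x <;> simp [h, ih]

lemma pvMapEq (cs : List Char) :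
    (List.range cs.length).map
      (fun k => if k % 2 = 0 then cs[k]?.getD ' '
                else pvShift (cs[k-1]?.getD ' ') (cs[k]?.getD ' ')) = pvPairsB cs := by
  induction cs using pvPairsB.induct with
  | case1 => simp [pvPairsB]
  | case2 c => simp [pvPairsB]
  | case3 c d rest ih =>
    rw [show (c :: d :: rest).length = rest.length + 1 + 1 from rfl,
        List.range_succ_eq_map, List.range_succ_eq_map]
    simp only [List.map_cons, List.map_map, pvPairsB]
    refine List.cons_eq_cons.mpr ⟨by simp, List.cons_eq_cons.mpr ⟨by simp, ?_⟩⟩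
    rw [← ih]
    apply List.map_congr_left
    intro k _
    simp only [Function.comp]
    by_cases h : k % 2 = 0
    · have h2 : (k + 1 + 1) % 2 = 0 := by omega
      simp [Nat.succ_eq_add_one, h2, h]
    · obtain ⟨m, rfl⟩ : ∃ m, k = m + 1 := ⟨k - 1, by omega⟩
      have h2 : (m + 1 + 1 + 1) % 2 = (m + 1) % 2 := by omega
      simp [Nat.succ_eq_add_one, h2, h]

theorem pv_main (s : String) : next_char s = next_char_alt s := by
  unfold next_char next_char_alt
  rw [pvFoldIte (fun i => PySem.Int.mod i 2 = 0)]
  rw [PySem.List.pyRange_one]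
  simp only [PySem.Str.len_eq, Int.sub_zero, Int.toNat_natCast, List.map_map, List.nil_append]
  congr 1
  rw [← pvMapEq s.toList]
  apply List.map_congr_left
  intro k _
  simp only [Function.comp]
  have z : (0:Int) + (k:Int) = (k:Int) := by ring
  rw [z]
  by_cases h : k % 2 = 0
  · have hc : PySem.Int.mod ((k:Int)) 2 = 0 := by
      simp; omega
    rw [if_pos hc, if_pos h]
    simp
  · have hc : ¬ PySem.Int.mod ((k:Int)) 2 = 0 := by
      simp; omega
    have h2 : ((k:Int)) - 1 = ((k - 1 : Nat) : Int) := by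
      have hk1 : 1 ≤ k := by omega
      push_cast [hk1]; ring
    rw [if_neg hc, if_neg h, h2]
    simp

-- ===== VERDICT (by name: the statement is the Claim_ definition above) =====
theorem next_char_spec : Claim_equal_next_char := by
  intro s _ _
  unfold Spec_next_char
  exact pv_main s
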